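-- pv_equiv track=rewrite | github.com/shaystevens/COSC343-Wordle-AI | cosc343_wordle/my_agent.py | mostUniqueWord
-- ===== SOURCE A (Python) =====
-- def checkMultipleLetters(word):
--     """
--     Checks if a word contains multiple of the same letter.
--
--     Parameters
--     ----------
--     word - The word (String) that is being checked
--
--     Returns
--     -------
--     True if the word contains multiple of the same letter else false
--     """
--     for letter in word:
--         if word.count(letter) > 1:
--             return True
--     return False
--
-- def mostUniqueWord(dictionary, correct_letters, partial_letters):
--     """
--     * This function is no longer used
--     Finds the unique word within a given dictionary, correct letters and partial letters.
--
--     Parameters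
--     ----------
--     dictionary - Dictionary list to find the unique word from
--     correct_letters - Correct letters list from previous guesses
--     partial_letters - Partial letters list from previous guesses
--
--     Returns
--     -------
--     A string of the unique word
--     """
--
--     # A dictionary that holds every word and score for that word
--     words_score = {}
--
--     for word in dictionary:
--         score = 0
--
--         # If a correct letter is in the word add the number of times it appears x2 to score
--         for letter in correct_letters:
--             if word.count(letter) > 0:
--                 score += word.count(letter) * 2
--
--         # If a partial letter is in the word and not in correct letter list add the number of times it appears to score
--         for letter in partial_letters:
--             if word.count(letter) > 0 and letter not in correct_letters:
--                 score += word.count(letter)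
--
--         # Update the scores
--         words_score.update({word: score})
--
--     # Get the unique word (The word with the minimum score)
--     unique_word = min(words_score, key=lambda k: words_score[k])
--
--     # If the unique word contains multiple of the same letter get the next unique word
--     while checkMultipleLetters(unique_word) and len(words_score) > 1:
--         del words_score[unique_word]
--         unique_word = min(words_score, key=lambda k: words_score[k])
--
--     return unique_word
-- ===== SOURCE B (Python) =====
-- def mostUniqueWord(dictionary, correct_letters, partial_letters):
--     # Single pass (no repeated min+delete): track the best unique-letter word
--     # (lowest score, first wins) and the overall "survivor" word (highest score,
--     # last wins) over the first-occurrence-deduplicated dictionary.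
--     best = None
--     worst = None
--     cset = set(correct_letters)
--     for word in dict.fromkeys(dictionary):
--         score = sum(word.count(l) * 2 for l in correct_letters)
--         score += sum(word.count(l) for l in partial_letters if l not in cset)
--         if worst is None or worst[1] <= score:
--             worst = (word, score)
--         if len(set(word)) == len(word) and (best is None or score < best[1]):
--             best = (word, score)
--     return (best or worst)[0]
-- ===== Notes on version B (the rewrite author's own statement) =====
-- stated objective: faster
-- what changed: Replaces building a score dict and repeatedly taking min() and deleting until a unique-letter word surfaces (quadratic rescans) with a single pass that simultaneously tracks the lowest-scoring unique-letter word (first tie wins) and the last highest-scoring word as fallback.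
import Mathlib
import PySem

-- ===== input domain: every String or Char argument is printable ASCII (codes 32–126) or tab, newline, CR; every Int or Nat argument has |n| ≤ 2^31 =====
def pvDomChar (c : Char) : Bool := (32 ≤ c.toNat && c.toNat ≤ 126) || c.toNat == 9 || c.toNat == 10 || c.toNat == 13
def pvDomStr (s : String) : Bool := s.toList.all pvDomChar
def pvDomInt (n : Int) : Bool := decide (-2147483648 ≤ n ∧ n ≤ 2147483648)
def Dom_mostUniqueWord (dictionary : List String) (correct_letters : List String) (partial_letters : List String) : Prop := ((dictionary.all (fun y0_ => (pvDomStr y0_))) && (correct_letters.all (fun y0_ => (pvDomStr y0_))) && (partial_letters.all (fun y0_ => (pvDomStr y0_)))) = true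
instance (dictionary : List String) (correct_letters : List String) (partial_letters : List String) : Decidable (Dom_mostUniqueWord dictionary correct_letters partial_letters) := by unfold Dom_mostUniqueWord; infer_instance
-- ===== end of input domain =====

-- B replaces A's score-dict plus repeated min()-and-delete rescans by a single pass that tracks
-- the lowest-scoring unique-letter word and a highest-scoring fallback (objective: faster).

-- ===== PORT A =====
def checkMultipleLetters (word : String) : Bool :=
  -- for letter in word: if word.count(letter) > 1: return True / return False
  word.toList.any (fun letter => 1 < PySem.Str.count word (String.ofList [letter]))

-- the per-word score accumulated by A's two inner `for letter in …` loops
def pvScoreA (correct_letters partial_letters : List String) (word : String) : Int :=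
  let score1 : Int := correct_letters.foldl
    (fun score letter => if 0 < PySem.Str.count word letter
      then score + (PySem.Str.count word letter : Int) * 2 else score) 0
  partial_letters.foldl
    (fun score letter => if 0 < PySem.Str.count word letter ∧ letter ∉ correct_letters
      then score + (PySem.Str.count word letter : Int) else score) score1

-- A's `while` loop; fuel = initial dict size (each iteration removes one key, so it cannot run out).
-- `min(words_score, key=lambda k: words_score[k])` is min? over the keys, keyed by dict lookup
-- (the lambda's `words_score[k]` is ported as getD k 0: every k it is applied to is a key of the dict).
def pvLoopA (fuel : Nat) (d : PySem.Dict String Int) : String :=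
  match fuel, PySem.List.min? d.keys (fun k => d.getD k 0) with
  | _, none => ""        -- empty dict: Python's min() raises ValueError; excluded by Pre_
  | 0, some u => u       -- fuel exhausted: unreachable from mostUniqueWord's call
  | fuel+1, some u =>
      if checkMultipleLetters u ∧ 1 < d.size then pvLoopA fuel (d.erase u) else u

def mostUniqueWord (dictionary correct_letters partial_letters : List String) : String :=
  let words_score := dictionary.foldl
    (fun d word => d.insert word (pvScoreA correct_letters partial_letters word)) PySem.Dict.empty
  pvLoopA words_score.size words_score

-- ===== PORT B =====
def pvScoreB (correct_letters : List String) (cset : PySem.Set String)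
    (partial_letters : List String) (word : String) : Int :=
  (correct_letters.foldl (fun a l => a + (PySem.Str.count word l : Int) * 2) 0)
  + (partial_letters.foldl
      (fun a l => if l ∈ cset then a else a + (PySem.Str.count word l : Int)) 0)

-- len(set(word)) == len(word)
def pvAllUnique (word : String) : Bool :=
  PySem.Set.len (PySem.Set.ofList word.toList) == PySem.Str.len word

-- one iteration of B's loop over the state (best, worst)
def pvStep (correct_letters : List String) (cset : PySem.Set String)
    (partial_letters : List String)
    (st : Option (String × Int) × Option (String × Int)) (word : String) :
    Option (String × Int) × Option (String × Int) :=
  let score := pvScoreB correct_letters cset partial_letters word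
  let worst := match st.2 with
    | none => some (word, score)
    | some p => if p.2 ≤ score then some (word, score) else st.2
  let best := if pvAllUnique word then
      match st.1 with
      | none => some (word, score)
      | some p => if score < p.2 then some (word, score) else st.1
    else st.1
  (best, worst)

def mostUniqueWord_alt (dictionary correct_letters partial_letters : List String) : String :=
  -- cset = set(correct_letters); for word in dict.fromkeys(dictionary): …
  let cset := PySem.Set.ofList correct_letters
  match (PySem.List.dedup dictionary).foldl (pvStep correct_letters cset partial_letters) (none, none) with
  | (some p, _) => p.1
  | (none, some p) => p.1
  | (none, none) => ""   -- empty dictionary: Python's `(best or worst)[0]` raises TypeError; excluded by Pre_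

-- ===== PRECONDITION & SPEC =====
-- On an empty dictionary A raises ValueError (min() of an empty dict) and B raises TypeError; excluded.
def Pre_mostUniqueWord (dictionary : List String) (correct_letters : List String) (partial_letters : List String) : Prop := dictionary ≠ []
instance (dictionary : List String) (correct_letters : List String) (partial_letters : List String) : Decidable (Pre_mostUniqueWord dictionary correct_letters partial_letters) := by unfold Pre_mostUniqueWord; infer_instance
def pvWitness_mostUniqueWord : List String × List String × List String := (["ab", "aa"], ["a"], ["b"])

def Spec_mostUniqueWord (dictionary : List String) (correct_letters : List String) (partial_letters : List String) (out : String) : Prop := out = mostUniqueWord_alt dictionary correct_letters partial_letters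
instance (dictionary : List String) (correct_letters : List String) (partial_letters : List String) (out : String) : Decidable (Spec_mostUniqueWord dictionary correct_letters partial_letters out) := by unfold Spec_mostUniqueWord; infer_instance

-- ===== CLAIM (what is proved, stated in full; the proofs are below) =====
def Claim_equal_mostUniqueWord : Prop := ∀ (dictionary : List String) (correct_letters : List String) (partial_letters : List String), Dom_mostUniqueWord dictionary correct_letters partial_letters → Pre_mostUniqueWord dictionary correct_letters partial_letters → Spec_mostUniqueWord dictionary correct_letters partial_letters (mostUniqueWord dictionary correct_letters partial_letters)

-- ===== LEMMAS AND PROOFS =====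

-- ---- the two per-word score computations agree ----

theorem pvScore_eq (cl pl : List String) (w : String) :
    pvScoreA cl pl w = pvScoreB cl (PySem.Set.ofList cl) pl w := by
  unfold pvScoreA pvScoreB
  have h1 : (fun (score : Int) letter => if 0 < PySem.Str.count w letter
        then score + (PySem.Str.count w letter : Int) * 2 else score)
      = (fun a l => a + (PySem.Str.count w l : Int) * 2) := by
    funext a l
    simp
  have h2 : (fun (score : Int) letter => if 0 < PySem.Str.count w letter ∧ letter ∉ cl
        then score + (PySem.Str.count w letter : Int) else score)
      = (fun (a : Int) l => a + (if l ∈ cl then 0 else (PySem.Str.count w l : Int))) := by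
    funext a l
    by_cases hm : l ∈ cl
    · simp [hm]
    · simp [hm]
  have h3 : (fun (a : Int) l => if l ∈ PySem.Set.ofList cl then a else a + (PySem.Str.count w l : Int))
      = (fun (a : Int) l => a + (if l ∈ cl then 0 else (PySem.Str.count w l : Int))) := by
    funext a l
    by_cases hm : l ∈ cl <;> simp [hm, PySem.Set.mem_ofList]
  simp only [h1, h2, h3, PySem.List.foldl_add]
  ring

-- ---- `word.count(c)` for a single character is List.count, and A's repeat test is B's set-size test ----

theorem pvGo_singleton (c : Char) : ∀ (l : List Char) (fuel : Nat) (acc : Nat), l.length ≤ fuel →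
    PySem.Chars.count.go [c] fuel l acc = acc + l.count c
  | [], fuel, acc, _ => by cases fuel <;> simp [PySem.Chars.count.go]
  | h :: t, 0, acc, hf => by simp at hf
  | h :: t, fuel+1, acc, hf => by
    have ht : t.length ≤ fuel := by simpa using hf
    by_cases hc : c = h
    · have : [c].isPrefixOf (h :: t) = true := by simp [List.isPrefixOf, hc]
      simp only [PySem.Chars.count.go, this, if_pos]
      rw [pvGo_singleton c _ fuel (acc+1) (by simpa using ht)]
      simp [hc]
      omega
    · have : [c].isPrefixOf (h :: t) = false := by
        simp [List.isPrefixOf]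
        first | (exact fun e => hc e.symm) | (exact fun e => hc e)
      simp only [PySem.Chars.count.go, this]
      rw [pvGo_singleton c t fuel acc ht]
      simp [List.count_cons]
      exact fun e => absurd e.symm hc

theorem pvCount_singleton (l : List Char) (c : Char) : PySem.Chars.count l [c] = l.count c := by
  simp [PySem.Chars.count]
  rw [pvGo_singleton c l l.length 0 le_rfl]
  simp

theorem pvOfListLen_iff {α : Type} [BEq α] [LawfulBEq α] (l : List α) :
    (PySem.Set.ofList l).length = l.length ↔ l.Nodup := by
  constructor
  · induction l with
    | nil => simp
    | cons x xs ih =>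
      intro h
      rw [PySem.Set.ofList_cons] at h
      simp only [List.length_cons] at h
      by_cases hx : x ∈ xs
      · exfalso
        have hlt : ((PySem.Set.ofList xs).discard x).length < (PySem.Set.ofList xs).length := by
          unfold PySem.Set.discard
          rw [List.length_filter_lt_length_iff_exists]
          exact ⟨x, (PySem.Set.mem_ofList xs x).2 hx, by simp⟩
        have := PySem.Set.length_ofList_le xs
        omega
      · have hd : (PySem.Set.ofList xs).discard x = PySem.Set.ofList xs := by
          unfold PySem.Set.discard
          apply List.filter_eq_self.2
          intro a ha
          have hax : a ≠ x := fun e => hx (e ▸ (PySem.Set.mem_ofList xs a).1 ha)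
          simp [hax]
        rw [hd] at h
        have hle := PySem.Set.length_ofList_le xs
        have : (PySem.Set.ofList xs).length = xs.length := by omega
        exact List.nodup_cons.2 ⟨hx, ih this⟩
  · intro h; rw [PySem.Set.ofList_eq_self_of_nodup l h]

theorem pvAllUnique_iff (w : String) : pvAllUnique w = true ↔ w.toList.Nodup := by
  unfold pvAllUnique
  simp only [PySem.Set.len, PySem.Str.len, beq_iff_eq, Int.natCast_inj]
  exact pvOfListLen_iff w.toList

theorem pvCheck_eq (w : String) : checkMultipleLetters w = !pvAllUnique w := by
  have h1 : checkMultipleLetters w = true ↔ ¬ w.toList.Nodup := by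
    unfold checkMultipleLetters
    rw [List.any_eq_true]
    constructor
    · rintro ⟨c, hc, hlt⟩
      simp only [PySem.Str.count, String.toList_ofList, pvCount_singleton, decide_eq_true_eq] at hlt
      rw [List.nodup_iff_count_le_one]
      push_neg
      exact ⟨c, by omega⟩
    · intro hnd
      rw [List.nodup_iff_count_le_one] at hnd
      push_neg at hnd
      obtain ⟨c, hc⟩ := hnd
      refine ⟨c, List.count_pos_iff.1 (by omega), ?_⟩
      simp only [PySem.Str.count, String.toList_ofList, pvCount_singleton, decide_eq_true_eq]
      omega
  cases hu : pvAllUnique w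
  · simp only [Bool.not_false]
    exact h1.2 (fun hn => by simp [pvAllUnique_iff w |>.2 hn] at hu)
  · simp only [Bool.not_true]
    rw [Bool.eq_false_iff]
    intro hc
    exact (h1.1 hc) ((pvAllUnique_iff w).1 hu)

-- ---- the first-minimum and last-maximum selection folds ----

def pvFirstMin (s : String → Int) (w : String) (t : List String) : String :=
  t.foldl (fun b x => if s x < s b then x else b) w

def pvLastMax (s : String → Int) (w : String) (t : List String) : String :=
  t.foldl (fun b x => if s b ≤ s x then x else b) w

theorem pvFirstMin_cons (s : String → Int) (w x : String) (t : List String) :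
    pvFirstMin s w (x :: t) = pvFirstMin s (if s x < s w then x else w) t := rfl

theorem pvLastMax_cons (s : String → Int) (w x : String) (t : List String) :
    pvLastMax s w (x :: t) = pvLastMax s (if s w ≤ s x then x else w) t := rfl

-- the value both programs must return
def pvAnswer (s : String → Int) (ws : List String) : String :=
  match ws.filter pvAllUnique with
  | b :: bs => pvFirstMin s b bs
  | [] => match ws with
          | w :: t => pvLastMax s w t
          | [] => ""

-- ---- min? over keys is the first-minimum fold ----

def pvMinFold (key : String → Int) (acc : Option String) (x : String) : Option String :=
  match acc with
  | none => some x
  | some m => if key x < key m then some x else some m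

theorem pvMin?_eq_myfold (xs : List String) (key : String → Int) :
    PySem.List.min? xs key = xs.foldl (pvMinFold key) none := by
  unfold PySem.List.min?
  congr 1
  funext acc x
  cases acc <;> rfl

theorem pvFoldlMinFold_congr (k1 k2 : String → Int) :
    ∀ (xs : List String) (acc : Option String), (∀ x ∈ xs, k1 x = k2 x) →
      (∀ m, acc = some m → k1 m = k2 m) →
      xs.foldl (pvMinFold k1) acc = xs.foldl (pvMinFold k2) acc
  | [], acc, _, _ => by simp
  | x :: t, acc, h, hacc => by
    have hx : k1 x = k2 x := h x (by simp)
    have hmem : ∀ y ∈ t, k1 y = k2 y := fun y hy => h y (by simp [hy])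
    simp only [List.foldl_cons]
    cases acc with
    | none =>
      exact pvFoldlMinFold_congr k1 k2 t (some x) hmem (fun m hm => by cases hm; exact hx)
    | some m =>
      have hm : k1 m = k2 m := hacc m rfl
      show t.foldl (pvMinFold k1) (if k1 x < k1 m then some x else some m)
         = t.foldl (pvMinFold k2) (if k2 x < k2 m then some x else some m)
      rw [hx, hm]
      by_cases hlt : k2 x < k2 m
      · simp only [hlt, if_pos]
        exact pvFoldlMinFold_congr k1 k2 t (some x) hmem (fun m' hm' => by cases hm'; exact hx)
      · simp only [hlt, if_neg, not_false_iff]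
        exact pvFoldlMinFold_congr k1 k2 t (some m) hmem (fun m' hm' => by cases hm'; exact hm)

theorem pvMin?_congr (xs : List String) (k1 k2 : String → Int)
    (h : ∀ x ∈ xs, k1 x = k2 x) : PySem.List.min? xs k1 = PySem.List.min? xs k2 := by
  rw [pvMin?_eq_myfold, pvMin?_eq_myfold]
  exact pvFoldlMinFold_congr k1 k2 xs none h (by simp)

theorem pvFoldlMin_some (s : String → Int) : ∀ (t : List String) (w : String),
    t.foldl (pvMinFold s) (some w) = some (pvFirstMin s w t)
  | [], w => rfl
  | x :: t, w => by
    simp only [List.foldl_cons, pvFirstMin]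
    show t.foldl (pvMinFold s) (if s x < s w then some x else some w)
       = some (List.foldl (fun b x => if s x < s b then x else b) (if s x < s w then x else w) t)
    by_cases hlt : s x < s w
    · simp only [hlt, if_pos]; exact pvFoldlMin_some s t x
    · simp only [hlt, if_neg, not_false_iff]; exact pvFoldlMin_some s t w

theorem pvMin?_cons (s : String → Int) (w : String) (t : List String) :
    PySem.List.min? (w :: t) s = some (pvFirstMin s w t) := by
  rw [pvMin?_eq_myfold]
  simp only [List.foldl_cons]
  exact pvFoldlMin_some s t w

-- ---- decompositions characterising the two folds ----

theorem pvFirstMin_keep (s : String → Int) : ∀ (t : List String) (b : String),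
    (∀ x ∈ t, s b ≤ s x) → pvFirstMin s b t = b
  | [], b, _ => rfl
  | x :: t, b, h => by
    rw [pvFirstMin_cons]
    have hx : s b ≤ s x := h x (by simp)
    rw [if_neg (by omega)]
    exact pvFirstMin_keep s t b (fun y hy => h y (by simp [hy]))

theorem pvLastMax_keep (s : String → Int) : ∀ (t : List String) (b : String),
    (∀ x ∈ t, s x < s b) → pvLastMax s b t = b
  | [], b, _ => rfl
  | x :: t, b, h => by
    rw [pvLastMax_cons]
    have hx : s x < s b := h x (by simp)
    rw [if_neg (by omega)]
    exact pvLastMax_keep s t b (fun y hy => h y (by simp [hy]))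

theorem pvFirstMin_aux (s : String → Int) (m : String) (l₂ : List String)
    (h2 : ∀ x ∈ l₂, s m ≤ s x) : ∀ (l₁ : List String) (b : String),
    (∀ x ∈ l₁, s m < s x) → s m < s b → pvFirstMin s b (l₁ ++ m :: l₂) = m
  | [], b, _, hb => by
    simp only [List.nil_append]
    rw [pvFirstMin_cons, if_pos hb]
    exact pvFirstMin_keep s l₂ m h2
  | a :: l₁, b, h1, hb => by
    simp only [List.cons_append]
    rw [pvFirstMin_cons]
    have ha : s m < s a := h1 a (by simp)
    by_cases hab : s a < s b
    · rw [if_pos hab]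
      exact pvFirstMin_aux s m l₂ h2 l₁ a (fun y hy => h1 y (by simp [hy])) ha
    · rw [if_neg hab]
      exact pvFirstMin_aux s m l₂ h2 l₁ b (fun y hy => h1 y (by simp [hy])) hb

theorem pvLastMax_aux (s : String → Int) (m : String) (l₂ : List String)
    (h2 : ∀ x ∈ l₂, s x < s m) : ∀ (l₁ : List String) (b : String),
    (∀ x ∈ l₁, s x ≤ s m) → s b ≤ s m → pvLastMax s b (l₁ ++ m :: l₂) = m
  | [], b, _, hb => by
    simp only [List.nil_append]
    rw [pvLastMax_cons, if_pos hb]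
    exact pvLastMax_keep s l₂ m h2
  | a :: l₁, b, h1, hb => by
    simp only [List.cons_append]
    rw [pvLastMax_cons]
    have ha : s a ≤ s m := h1 a (by simp)
    by_cases hab : s b ≤ s a
    · rw [if_pos hab]
      exact pvLastMax_aux s m l₂ h2 l₁ a (fun y hy => h1 y (by simp [hy])) ha
    · rw [if_neg hab]
      exact pvLastMax_aux s m l₂ h2 l₁ b (fun y hy => h1 y (by simp [hy])) hb

theorem pvFirstMin_of_split (s : String → Int) (m h : String) (l₁ l₂ t : List String)
    (h1 : ∀ x ∈ l₁, s m < s x) (h2 : ∀ x ∈ l₂, s m ≤ s x)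
    (he : h :: t = l₁ ++ m :: l₂) : pvFirstMin s h t = m := by
  cases l₁ with
  | nil =>
    rw [List.nil_append] at he
    injection he with e1 e2
    subst e1; subst e2
    exact pvFirstMin_keep s _ _ h2
  | cons a l₁' =>
    rw [List.cons_append] at he
    injection he with e1 e2
    subst e1; subst e2
    exact pvFirstMin_aux s _ _ h2 _ _ (fun y hy => h1 y (by simp [hy])) (h1 _ (by simp))

theorem pvLastMax_of_split (s : String → Int) (m h : String) (l₁ l₂ t : List String)
    (h1 : ∀ x ∈ l₁, s x ≤ s m) (h2 : ∀ x ∈ l₂, s x < s m)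
    (he : h :: t = l₁ ++ m :: l₂) : pvLastMax s h t = m := by
  cases l₁ with
  | nil =>
    rw [List.nil_append] at he
    injection he with e1 e2
    subst e1; subst e2
    exact pvLastMax_keep s _ _ h2
  | cons a l₁' =>
    rw [List.cons_append] at he
    injection he with e1 e2
    subst e1; subst e2
    exact pvLastMax_aux s _ _ h2 _ _ (fun y hy => h1 y (by simp [hy])) (h1 _ (by simp))

theorem pvFirstMin_split (s : String → Int) : ∀ (t : List String) (w : String),
    ∃ l₁ l₂, w :: t = l₁ ++ pvFirstMin s w t :: l₂ ∧
      (∀ x ∈ l₁, s (pvFirstMin s w t) < s x) ∧ (∀ x ∈ l₂, s (pvFirstMin s w t) ≤ s x)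
  | [], w => ⟨[], [], by simp [pvFirstMin]⟩
  | x :: t, w => by
    rw [pvFirstMin_cons]
    by_cases hlt : s x < s w
    · rw [if_pos hlt]
      obtain ⟨l₁, l₂, he, hl1, hl2⟩ := pvFirstMin_split s t x
      set m := pvFirstMin s x t with hm
      have hmx : s m ≤ s x := by
        have hx : x ∈ x :: t := by simp
        rw [he] at hx
        rcases List.mem_append.1 hx with hc1 | hc2
        · exact le_of_lt (hl1 x hc1)
        · rcases List.mem_cons.1 hc2 with heq | hc3
          · exact (congrArg s heq).ge
          · exact hl2 x hc3
      refine ⟨w :: l₁, l₂, by rw [List.cons_append, ← he], ?_, hl2⟩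
      intro y hy
      rcases List.mem_cons.1 hy with rfl | hy'
      · omega
      · exact hl1 y hy'
    · rw [if_neg hlt]
      obtain ⟨l₁, l₂, he, hl1, hl2⟩ := pvFirstMin_split s t w
      set m := pvFirstMin s w t with hm
      cases l₁ with
      | nil =>
        rw [List.nil_append] at he
        injection he with e1 e2
        refine ⟨[], x :: l₂, ?_, by simp, ?_⟩
        · rw [List.nil_append, ← e1, ← e2]
        · intro y hy
          rcases List.mem_cons.1 hy with rfl | hy'
          · rw [← e1]; omega
          · exact hl2 y hy'
      | cons a l₁' =>
        rw [List.cons_append] at he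
        injection he with e1 e2
        subst e1
        have hwm : s m < s w := hl1 w (by simp)
        refine ⟨w :: x :: l₁', l₂, ?_, ?_, hl2⟩
        · rw [e2]; rfl
        · intro y hy
          rcases List.mem_cons.1 hy with rfl | hy'
          · exact hwm
          · rcases List.mem_cons.1 hy' with rfl | hy''
            · omega
            · exact hl1 y (by simp [hy''])

theorem pvLastMax_split (s : String → Int) : ∀ (t : List String) (w : String),
    ∃ l₁ l₂, w :: t = l₁ ++ pvLastMax s w t :: l₂ ∧
      (∀ x ∈ l₁, s x ≤ s (pvLastMax s w t)) ∧ (∀ x ∈ l₂, s x < s (pvLastMax s w t))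
  | [], w => ⟨[], [], by simp [pvLastMax]⟩
  | x :: t, w => by
    rw [pvLastMax_cons]
    by_cases hle : s w ≤ s x
    · rw [if_pos hle]
      obtain ⟨l₁, l₂, he, hl1, hl2⟩ := pvLastMax_split s t x
      set m := pvLastMax s x t with hm
      have hmx : s x ≤ s m := by
        have hx : x ∈ x :: t := by simp
        rw [he] at hx
        rcases List.mem_append.1 hx with hc1 | hc2
        · exact hl1 x hc1
        · rcases List.mem_cons.1 hc2 with heq | hc3
          · exact (congrArg s heq).le
          · exact le_of_lt (hl2 x hc3)
      refine ⟨w :: l₁, l₂, by rw [List.cons_append, ← he], ?_, hl2⟩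
      intro y hy
      rcases List.mem_cons.1 hy with rfl | hy'
      · omega
      · exact hl1 y hy'
    · rw [if_neg hle]
      obtain ⟨l₁, l₂, he, hl1, hl2⟩ := pvLastMax_split s t w
      set m := pvLastMax s w t with hm
      cases l₁ with
      | nil =>
        rw [List.nil_append] at he
        injection he with e1 e2
        refine ⟨[], x :: l₂, ?_, by simp, ?_⟩
        · rw [List.nil_append, ← e1, ← e2]
        · intro y hy
          rcases List.mem_cons.1 hy with rfl | hy'
          · rw [← e1]; omega
          · exact hl2 y hy'
      | cons a l₁' =>
        rw [List.cons_append] at he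
        injection he with e1 e2
        subst e1
        have hwm : s w ≤ s m := hl1 w (by simp)
        refine ⟨w :: x :: l₁', l₂, ?_, ?_, hl2⟩
        · rw [e2]; rfl
        · intro y hy
          rcases List.mem_cons.1 hy with rfl | hy'
          · exact hwm
          · rcases List.mem_cons.1 hy' with rfl | hy''
            · omega
            · exact hl1 y (by simp [hy''])

-- ---- B's fold computes pvAnswer ----

def pvBStep (cl : List String) (cset : PySem.Set String) (pl : List String)
    (st : Option (String × Int)) (word : String) : Option (String × Int) :=
  if pvAllUnique word then
    match st with
    | none => some (word, pvScoreB cl cset pl word)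
    | some p => if pvScoreB cl cset pl word < p.2 then some (word, pvScoreB cl cset pl word) else st
  else st

def pvWStep (cl : List String) (cset : PySem.Set String) (pl : List String)
    (st : Option (String × Int)) (word : String) : Option (String × Int) :=
  match st with
  | none => some (word, pvScoreB cl cset pl word)
  | some p => if p.2 ≤ pvScoreB cl cset pl word then some (word, pvScoreB cl cset pl word) else st

theorem pvStep_pair (cl : List String) (cset : PySem.Set String) (pl : List String) : ∀ (ws : List String) (st : Option (String × Int) × Option (String × Int)),
    ws.foldl (pvStep cl cset pl) st = (ws.foldl (pvBStep cl cset pl) st.1, ws.foldl (pvWStep cl cset pl) st.2)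
  | [], st => rfl
  | w :: t, st => by
    simp only [List.foldl_cons]
    rw [pvStep_pair cl cset pl t]
    rfl

theorem pvWfold_some (cl : List String) (cset : PySem.Set String) (pl : List String) : ∀ (t : List String) (b : String),
    t.foldl (pvWStep cl cset pl) (some (b, pvScoreB cl cset pl b))
      = some (pvLastMax (pvScoreB cl cset pl) b t, pvScoreB cl cset pl (pvLastMax (pvScoreB cl cset pl) b t))
  | [], b => rfl
  | x :: t, b => by
    simp only [List.foldl_cons, pvWStep, pvLastMax_cons]
    by_cases hle : pvScoreB cl cset pl b ≤ pvScoreB cl cset pl x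
    · rw [if_pos hle, if_pos hle]
      exact pvWfold_some cl cset pl t x
    · rw [if_neg hle, if_neg hle]
      exact pvWfold_some cl cset pl t b

theorem pvBfold_some (cl : List String) (cset : PySem.Set String) (pl : List String) : ∀ (t : List String) (b : String),
    t.foldl (pvBStep cl cset pl) (some (b, pvScoreB cl cset pl b))
      = some (pvFirstMin (pvScoreB cl cset pl) b (t.filter pvAllUnique),
              pvScoreB cl cset pl (pvFirstMin (pvScoreB cl cset pl) b (t.filter pvAllUnique)))
  | [], b => rfl
  | x :: t, b => by
    simp only [List.foldl_cons, pvBStep]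
    by_cases hu : pvAllUnique x
    · rw [if_pos hu]
      rw [List.filter_cons_of_pos hu, pvFirstMin_cons]
      by_cases hlt : pvScoreB cl cset pl x < pvScoreB cl cset pl b
      · rw [if_pos hlt, if_pos hlt]
        exact pvBfold_some cl cset pl t x
      · rw [if_neg hlt, if_neg hlt]
        exact pvBfold_some cl cset pl t b
    · rw [if_neg hu, List.filter_cons_of_neg (by simpa using hu)]
      exact pvBfold_some cl cset pl t b

theorem pvBfold_none (cl : List String) (cset : PySem.Set String) (pl : List String) : ∀ (ws : List String),
    ws.foldl (pvBStep cl cset pl) none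
      = (match ws.filter pvAllUnique with
         | [] => none
         | b :: bs => some (pvFirstMin (pvScoreB cl cset pl) b bs,
                            pvScoreB cl cset pl (pvFirstMin (pvScoreB cl cset pl) b bs)))
  | [] => rfl
  | w :: t => by
    simp only [List.foldl_cons, pvBStep]
    by_cases hu : pvAllUnique w
    · rw [if_pos hu, List.filter_cons_of_pos hu]
      exact pvBfold_some cl cset pl t w
    · rw [if_neg hu, List.filter_cons_of_neg (by simpa using hu)]
      exact pvBfold_none cl cset pl t

theorem pvAlt_eq_answer (d cl pl : List String) (hne : PySem.List.dedup d ≠ []) :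
    mostUniqueWord_alt d cl pl
      = pvAnswer (pvScoreB cl (PySem.Set.ofList cl) pl) (PySem.List.dedup d) := by
  unfold mostUniqueWord_alt pvAnswer
  show (match (PySem.List.dedup d).foldl
      (pvStep cl (PySem.Set.ofList cl) pl) (none, none) with
    | (some p, _) => p.1
    | (none, some p) => p.1
    | (none, none) => "") = _
  obtain ⟨w, t, hwt⟩ := List.exists_cons_of_ne_nil hne
  rw [hwt]
  rw [pvStep_pair cl (PySem.Set.ofList cl) pl]
  simp only
  rw [pvBfold_none cl (PySem.Set.ofList cl) pl]
  cases hf : (w :: t).filter pvAllUnique with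
  | cons b bs => simp
  | nil =>
    simp only
    have : (w :: t).foldl (pvWStep cl (PySem.Set.ofList cl) pl) none
        = t.foldl (pvWStep cl (PySem.Set.ofList cl) pl)
            (some (w, pvScoreB cl (PySem.Set.ofList cl) pl w)) := by
      simp [pvWStep]
    rw [this, pvWfold_some cl (PySem.Set.ofList cl) pl]

-- ---- the dict A builds is the deduplicated word/score association list ----

theorem pvGetD_fold (g : String → Int) : ∀ (l : List String) (D0 : PySem.Dict String Int) (k : String),
    (l.foldl (fun acc w => acc.insert w (g w)) D0).getD k 0
      = if k ∈ l then g k else D0.getD k 0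
  | [], D0, k => by simp
  | a :: l, D0, k => by
    simp only [List.foldl_cons]
    rw [pvGetD_fold g l (D0.insert a (g a)) k]
    by_cases hk : k ∈ l
    · simp [hk]
    · rw [if_neg hk]
      rw [PySem.Dict.getD_insert]
      by_cases hka : k = a
      · simp [hka]
      · simp [hka, List.mem_cons, hk]

theorem pvDict_eq (d : List String) (g : String → Int) :
    d.foldl (fun acc word => acc.insert word (g word)) PySem.Dict.empty
      = PySem.Dict.mk ((PySem.List.dedup d).map (fun w => (w, g w))) := by
  apply PySem.Dict.ext
  have hkeys : (d.foldl (fun acc word => acc.insert word (g word)) PySem.Dict.empty).keys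
      = PySem.List.dedup d := by
    rw [PySem.Dict.keys_foldl_insert d (fun _ w => g w) PySem.Dict.empty]
    show PySem.Set.update [] d = _
    rw [PySem.Set.update_nil_left]
    rfl
  have hnd : (d.foldl (fun acc word => acc.insert word (g word)) PySem.Dict.empty).keys.Nodup := by
    rw [hkeys]
    exact PySem.Set.nodup_ofList d
  rw [PySem.Dict.items_eq_map_keys _ hnd 0, hkeys]
  show (PySem.List.dedup d).map _ = (PySem.List.dedup d).map _
  apply List.map_congr_left
  intro k hk
  have hkd : k ∈ d := (PySem.Set.mem_ofList d k).1 hk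
  rw [pvGetD_fold g d PySem.Dict.empty k, if_pos hkd]

-- ---- facts about the literal association dict (mk (ws.map pair)) ----

theorem pvKeys_mk (s : String → Int) (ws : List String) :
    (PySem.Dict.mk (ws.map (fun w => (w, s w)))).keys = ws := by
  simp [PySem.Dict.keys, List.map_map, Function.comp_def]

theorem pvSize_mk (s : String → Int) (ws : List String) :
    (PySem.Dict.mk (ws.map (fun w => (w, s w)))).size = ws.length := by
  simp [PySem.Dict.size]

theorem pvGetD_mk (s : String → Int) : ∀ (ws : List String) (k : String), k ∈ ws →
    (PySem.Dict.mk (ws.map (fun w => (w, s w)))).getD k 0 = s k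
  | [], k, hk => by simp at hk
  | a :: ws, k, hk => by
    unfold PySem.Dict.getD PySem.Dict.get?
    simp only [List.map_cons, List.find?]
    by_cases hka : a == k
    · simp only [hka]
      simp only [beq_iff_eq] at hka
      simp [hka]
    · simp only [hka]
      have hk' : k ∈ ws := by
        rcases List.mem_cons.1 hk with rfl | h
        · simp at hka
        · exact h
      exact pvGetD_mk s ws k hk'

theorem pvErase_mk (s : String → Int) (ws : List String) (m : String) :
    (PySem.Dict.mk (ws.map (fun w => (w, s w)))).erase m
      = PySem.Dict.mk ((ws.filter (fun x => !(x == m))).map (fun w => (w, s w))) := by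
  unfold PySem.Dict.erase
  congr 1
  simp only
  rw [List.filter_map]
  rfl

-- ---- pvAnswer at the minimum: the two cases of A's loop step ----

theorem pvAnswer_of_uniq_min (s : String → Int) (w : String) (t : List String)
    (hu : pvAllUnique (pvFirstMin s w t) = true) :
    pvAnswer s (w :: t) = pvFirstMin s w t := by
  obtain ⟨l₁, l₂, he, h1, h2⟩ := pvFirstMin_split s t w
  set m := pvFirstMin s w t with hm
  have hfe : (w :: t).filter pvAllUnique
      = l₁.filter pvAllUnique ++ m :: l₂.filter pvAllUnique := by
    rw [he, List.filter_append, List.filter_cons_of_pos hu]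
  unfold pvAnswer
  rw [hfe]
  cases hl : l₁.filter pvAllUnique with
  | nil =>
    simp only [List.nil_append]
    exact pvFirstMin_keep s _ m (fun y hy => h2 y (List.mem_of_mem_filter hy))
  | cons a af =>
    simp only [List.cons_append]
    exact pvFirstMin_of_split s m a (a :: af) (l₂.filter pvAllUnique) _
      (fun y hy => h1 y (List.mem_of_mem_filter (hl ▸ hy)))
      (fun y hy => h2 y (List.mem_of_mem_filter hy)) rfl

theorem pvAnswer_erase (s : String → Int) (w : String) (t : List String)
    (hnd : (w :: t).Nodup) (hte : t ≠ [])
    (hu : pvAllUnique (pvFirstMin s w t) = false) :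
    ((w :: t).filter (fun x => !(x == pvFirstMin s w t))).length = t.length ∧
    (w :: t).filter (fun x => !(x == pvFirstMin s w t)) ≠ [] ∧
    ((w :: t).filter (fun x => !(x == pvFirstMin s w t))).Nodup ∧
    pvAnswer s (w :: t) = pvAnswer s ((w :: t).filter (fun x => !(x == pvFirstMin s w t))) := by
  obtain ⟨l₁, l₂, he, h1, h2⟩ := pvFirstMin_split s t w
  generalize hG : pvFirstMin s w t = m at hu he h1 h2 ⊢
  have hnd' := hnd
  rw [he] at hnd'
  have hml1 : m ∉ l₁ := by
    intro hmem
    exact (List.disjoint_of_nodup_append hnd') hmem (List.mem_cons.2 (Or.inl rfl))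
  have hml2 : m ∉ l₂ := (List.nodup_cons.1 (List.nodup_append.1 hnd').2.1).1
  have hfl1 : l₁.filter (fun x => !(x == m)) = l₁ :=
    List.filter_eq_self.2 (fun a ha => by
      have : a ≠ m := fun e => hml1 (e ▸ ha)
      simp [this])
  have hfl2 : l₂.filter (fun x => !(x == m)) = l₂ :=
    List.filter_eq_self.2 (fun a ha => by
      have : a ≠ m := fun e => hml2 (e ▸ ha)
      simp [this])
  have hws' : (w :: t).filter (fun x => !(x == m)) = l₁ ++ l₂ := by
    rw [he, List.filter_append, hfl1, List.filter_cons_of_neg (by simp), hfl2]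
  have hlen : ((w :: t).filter (fun x => !(x == m))).length = t.length := by
    have := congrArg List.length he
    simp only [List.length_cons, List.length_append] at this
    rw [hws']
    simp only [List.length_append]
    omega
  have hne' : (w :: t).filter (fun x => !(x == m)) ≠ [] := by
    intro hnil
    rw [hnil] at hlen
    exact hte (List.length_eq_zero_iff.1 (by simpa using hlen.symm))
  have hndws' : ((w :: t).filter (fun x => !(x == m))).Nodup := by
    rw [hws']
    exact ((List.sublist_cons_self m l₂).append_left l₁).nodup hnd'
  refine ⟨hlen, hne', hndws', ?_⟩
  -- the unique-letter filters agree
  have hfilter : (w :: t).filter pvAllUnique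
      = ((w :: t).filter (fun x => !(x == m))).filter pvAllUnique := by
    rw [hws', he, List.filter_append, List.filter_cons_of_neg (by simp [hu]), List.filter_append]
  cases hfu : ((w :: t).filter (fun x => !(x == m))).filter pvAllUnique with
  | cons b bs =>
    unfold pvAnswer
    rw [hfilter, hfu]
  | nil =>
    -- no unique-letter word anywhere: both sides are the last maximum
    unfold pvAnswer
    rw [hfilter, hfu]
    simp only
    obtain ⟨w', t', hwt'⟩ := List.exists_cons_of_ne_nil hne'
    rw [hwt']
    simp only
    -- characterise the last maximum of w :: t
    obtain ⟨g₁, g₂, heg, hg1, hg2⟩ := pvLastMax_split s t w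
    generalize hH : pvLastMax s w t = M at heg hg1 hg2 ⊢
    have hmM : m ≠ M := by
      intro hEq
      have hminAll : ∀ x ∈ w :: t, s m ≤ s x := by
        intro x hx
        rw [he] at hx
        rcases List.mem_append.1 hx with hc | hc
        · exact le_of_lt (h1 x hc)
        · rcases List.mem_cons.1 hc with rfl | hc'
          · exact le_rfl
          · exact h2 x hc'
      have hmaxAll : ∀ x ∈ w :: t, s x ≤ s M := by
        intro x hx
        rw [heg] at hx
        rcases List.mem_append.1 hx with hc | hc
        · exact hg1 x hc
        · rcases List.mem_cons.1 hc with rfl | hc'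
          · exact le_rfl
          · exact le_of_lt (hg2 x hc')
      have hallEq : ∀ x ∈ w :: t, s x = s m := by
        intro x hx
        have a1 := hminAll x hx
        have a2 := hmaxAll x hx
        rw [← hEq] at a2
        omega
      have hl1nil : l₁ = [] := by
        apply List.eq_nil_iff_forall_not_mem.2
        intro a ha
        have hamem : a ∈ w :: t := by rw [he]; exact List.mem_append.2 (Or.inl ha)
        have := h1 a ha
        have := hallEq a hamem
        omega
      have hg2nil : g₂ = [] := by
        apply List.eq_nil_iff_forall_not_mem.2
        intro a ha
        have hamem : a ∈ w :: t := by
          rw [heg]; exact List.mem_append.2 (Or.inr (List.mem_cons.2 (Or.inr ha)))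
        have hb1 := hg2 a ha
        have hb2 := hallEq a hamem
        rw [← hEq] at hb1
        omega
      -- w :: t = m :: l₂  and  w :: t = g₁ ++ [M]; Nodup and t ≠ [] make this impossible
      rw [hl1nil, List.nil_append] at he
      injection he with e1 e2
      rw [hg2nil] at heg
      cases g₁ with
      | nil =>
        rw [List.nil_append] at heg
        injection heg with _ e4
        exact hte e4
      | cons a g₁' =>
        rw [List.cons_append] at heg
        injection heg with _ e4
        have hMt : M ∈ t := by rw [e4]; simp
        rw [← hEq] at hMt
        rw [e2] at hMt
        exact hml2 hMt
    -- ws' keeps the decomposition around M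
    have hfg1 : w' :: t' = g₁.filter (fun x => !(x == m)) ++ M :: g₂.filter (fun x => !(x == m)) := by
      rw [← hwt', hws']
      have : l₁ ++ l₂ = (w :: t).filter (fun x => !(x == m)) := hws'.symm
      rw [this, heg, List.filter_append,
        List.filter_cons_of_pos (by simp; exact fun e => hmM e.symm)]
    exact (pvLastMax_of_split s M w' _ _ t'
      (fun y hy => hg1 y (List.mem_of_mem_filter hy))
      (fun y hy => hg2 y (List.mem_of_mem_filter hy)) hfg1).symm

-- ---- A's loop computes pvAnswer ----

theorem pvLoopA_answer (s : String → Int) : ∀ (fuel : Nat) (ws : List String),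
    ws ≠ [] → ws.Nodup → ws.length ≤ fuel →
    pvLoopA fuel (PySem.Dict.mk (ws.map (fun w => (w, s w)))) = pvAnswer s ws := by
  intro fuel
  induction fuel with
  | zero =>
    intro ws hne _ hf
    cases ws with
    | nil => exact absurd rfl hne
    | cons a b => simp at hf
  | succ fuel ih =>
    intro ws hne hnd hf
    obtain ⟨w, t, rfl⟩ := List.exists_cons_of_ne_nil hne
    have hmin : PySem.List.min?
        ((PySem.Dict.mk ((w :: t).map (fun x => (x, s x)))).keys)
        (fun k => (PySem.Dict.mk ((w :: t).map (fun x => (x, s x)))).getD k 0)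
        = some (pvFirstMin s w t) := by
      rw [pvKeys_mk]
      rw [pvMin?_congr (w :: t) _ s (fun x hx => pvGetD_mk s (w :: t) x hx)]
      exact pvMin?_cons s w t
    rw [pvLoopA.eq_def, hmin]
    simp only
    set m := pvFirstMin s w t with hm
    rw [pvCheck_eq m, pvSize_mk]
    cases hu : pvAllUnique m with
    | true =>
      rw [if_neg (by simp)]
      exact (pvAnswer_of_uniq_min s w t hu).symm
    | false =>
      by_cases hte : t = []
      · subst hte
        rw [if_neg (by simp)]
        have hmw : m = w := rfl
        rw [hmw] at hu
        unfold pvAnswer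
        rw [List.filter_cons_of_neg (by simp [hu])]
        simp [pvLastMax, hmw]
      · have hlen : 1 < (w :: t).length := by
          cases t with
          | nil => exact absurd rfl hte
          | cons a b => simp
        rw [if_pos (show _ ∧ _ from ⟨by simp, hlen⟩)]
        rw [pvErase_mk]
        obtain ⟨hlen', hne', hnd', hans⟩ := pvAnswer_erase s w t hnd hte hu
        rw [ih _ hne' hnd' (by simp only [List.length_cons] at hf; omega)]
        exact hans.symm

-- ===== VERDICT (by name: the statement is the Claim_ definition above) =====
theorem mostUniqueWord_spec : Claim_equal_mostUniqueWord := by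
  intro d cl pl _ hpre
  unfold Spec_mostUniqueWord
  unfold mostUniqueWord
  have hfun : (fun (acc : PySem.Dict String Int) word => acc.insert word (pvScoreA cl pl word))
      = (fun acc word => acc.insert word (pvScoreB cl (PySem.Set.ofList cl) pl word)) := by
    funext acc word
    rw [pvScore_eq]
  rw [hfun, pvDict_eq d (pvScoreB cl (PySem.Set.ofList cl) pl)]
  have hne : PySem.List.dedup d ≠ [] := by
    unfold Pre_mostUniqueWord at hpre
    obtain ⟨a, l, rfl⟩ := List.exists_cons_of_ne_nil hpre
    rw [show PySem.List.dedup (a :: l) = PySem.Set.ofList (a :: l) from rfl,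
      PySem.Set.ofList_cons]
    simp
  show pvLoopA
      (PySem.Dict.mk ((PySem.List.dedup d).map (fun w => (w, pvScoreB cl (PySem.Set.ofList cl) pl w)))).size
      (PySem.Dict.mk ((PySem.List.dedup d).map (fun w => (w, pvScoreB cl (PySem.Set.ofList cl) pl w))))
    = mostUniqueWord_alt d cl pl
  rw [pvSize_mk]
  rw [pvLoopA_answer (pvScoreB cl (PySem.Set.ofList cl) pl) _ _ hne (PySem.Set.nodup_ofList d) le_rfl]
  exact (pvAlt_eq_answer d cl pl hne).symm
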